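-- pv_equiv track=rewrite | github.com/tomdif/causal-algebraic-geometry-lean | scripts/cag_casimir_test.py | count_CC_rect
-- ===== SOURCE A (Python) =====
-- def column_states(L):
--     """All possible column fibers: [l, u] with 0 <= l <= u < L, plus 'empty'."""
--     states = [("E",)]  # empty sentinel
--     for l in range(L):
--         for u in range(l, L):
--             states.append((l, u))
--     return states
--
-- def allowed_transition(s0, s1):
--     """Pairwise convexity constraint between adjacent column fibers.
--
--     If both non-empty: need lower and upper boundaries both non-increasing
--     from column i to i+1 (l1 <= l0 AND u1 <= u0). This handles both the
--     overlap case and the correct disjoint case (column 1 strictly below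
--     column 0). The other disjoint case (column 0 strictly below column 1)
--     is correctly blocked because it violates u1 <= u0.
--     """
--     if s0 == ("E",) or s1 == ("E",):
--         return True
--     l0, u0 = s0
--     l1, u1 = s1
--     return (l1 <= l0) and (u1 <= u0)
--
-- def count_CC_rect(a, L):
--     """|CC([a] x [L])| via transfer matrix in the column direction."""
--     states = column_states(L)
--     N = len(states)
--     # v[i] counts paths ending in state i over the current column index.
--     v = [1] * N
--     for _step in range(a - 1):
--         v_new = [0] * N
--         for j, sj in enumerate(states):
--             total = 0
--             for i, si in enumerate(states):
--                 if allowed_transition(si, sj):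
--                     total += v[i]
--             v_new[j] = total
--         v = v_new
--     return sum(v)
-- ===== SOURCE B (Python) =====
-- def count_CC_rect(a, L):
--     """|CC([a] x [L])| via transfer matrix, with 2D suffix sums per step.
--
--     State values: vE for the empty column, rows[l][u-l] for the interval [l,u]
--     (0 <= l <= u < L). Each transfer step is O(L^2) instead of A's O(L^4)
--     all-pairs scan: the new value of [l1,u1] is vE + S(l1,u1) where
--     S(l,u) = sum over l0 >= l, u0 >= max(l0, u) of rows[l0][u0-l0],
--     computed by running suffix sums bottom-up over the rows.
--     """
--     vE = 1
--     rows = [[1] * (L - l) for l in range(L)]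
--     for _ in range(a - 1):
--         total = vE + sum(sum(r) for r in rows)
--         S = [0] * L  # after processing row l: S[u] = S(l, u)
--         new_rows = []  # built from l = L-1 down to 0, reversed at the end
--         for l, row in zip(range(L - 1, -1, -1), reversed(rows)):
--             # R[k] = sum(row[k:])
--             R = [0] * (L - l + 1)
--             for k in range(L - l - 1, -1, -1):
--                 R[k] = row[k] + R[k + 1]
--             S = [R[max(u - l, 0)] + S[u] for u in range(L)]
--             new_rows.append([vE + S[u] for u in range(l, L)])
--         new_rows.reverse()
--         rows = new_rows
--         vE = total
--     return vE + sum(sum(r) for r in rows)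
-- ===== Notes on version B (the rewrite author's own statement) =====
-- stated objective: alternative
-- what changed: Each transfer step's all-pairs scan over the ~L^2/2 column states is replaced by per-row suffix sums plus a running 2D suffix-sum vector (O(L^2) per step instead of O(L^4)); both still perform a-1 steps, so a timing run could not confirm 'faster' on inputs with huge a.
import Mathlib
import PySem

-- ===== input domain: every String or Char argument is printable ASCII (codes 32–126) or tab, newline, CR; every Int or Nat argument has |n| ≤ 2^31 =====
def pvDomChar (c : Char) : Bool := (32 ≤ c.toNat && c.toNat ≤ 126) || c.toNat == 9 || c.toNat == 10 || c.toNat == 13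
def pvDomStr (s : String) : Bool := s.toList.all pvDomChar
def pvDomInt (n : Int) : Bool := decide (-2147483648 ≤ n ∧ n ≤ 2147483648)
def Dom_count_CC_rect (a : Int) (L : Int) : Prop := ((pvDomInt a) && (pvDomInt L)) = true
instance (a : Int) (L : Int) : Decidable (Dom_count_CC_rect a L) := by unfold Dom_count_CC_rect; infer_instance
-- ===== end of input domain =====

-- B replaces A's all-pairs transfer step by 2D suffix sums over the interval states
-- (a different per-step algorithm; both versions still run a-1 steps); equal return
-- value is proved for all inputs.

-- ===== PORT A =====
-- state ("E",) ↦ none, state (l, u) ↦ some (l, u)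


def pvAllowed (s0 s1 : Option (Int × Int)) : Bool :=
  match s0, s1 with
  | none, _ => true
  | _, none => true
  | some (l0, u0), some (l1, u1) => decide (l1 ≤ l0) && decide (u1 ≤ u0)

def pvColumnStates (L : Int) : List (Option (Int × Int)) :=
  (PySem.List.pyRange 0 L 1).foldl
    (fun states l =>
      (PySem.List.pyRange l L 1).foldl (fun st u => st ++ [some (l, u)]) states)
    [none]

def count_CC_rect (a : Int) (L : Int) : Int :=
  let states := pvColumnStates L
  -- v = [1] * N
  let v0 : List Int := List.replicate states.length 1
  -- A reads v[i] alongside states[i] (enumerate + list indexing): ported as states.zip v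
  let v := (PySem.List.pyRange 0 (a - 1) 1).foldl
    (fun v _step =>
      states.map (fun sj =>
        (states.zip v).foldl
          (fun total si_vi => if pvAllowed si_vi.1 sj then total + si_vi.2 else total) 0))
    v0
  v.sum

-- ===== PORT B =====
-- the downward loop building R with R[k] = row[k] + R[k+1], R[len] = 0

def pvSuffix : List Int → List Int
  | [] => [0]
  | x :: xs => (x + (pvSuffix xs).headD 0) :: pvSuffix xs

def count_CC_rect_alt (a : Int) (L : Int) : Int :=
  let init : Int × List (List Int) :=
    (1, (PySem.List.pyRange 0 L 1).map (fun l => List.replicate (L - l).toNat 1))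
  let res := (PySem.List.pyRange 0 (a - 1) 1).foldl
    (fun st _step =>
      let vE := st.1
      let rows := st.2
      let total := vE + (rows.map List.sum).sum
      -- for l, row in zip(range(L-1, -1, -1), reversed(rows)): …  (the list indexings
      -- R[..] and S[u] are in range in Source B; ported with pyGetD default 0)
      let p := ((PySem.List.pyRange (L - 1) (-1) (-1)).zip rows.reverse).foldl
        (fun (acc : List Int × List (List Int)) lrow =>
          let l := lrow.1
          let R := pvSuffix lrow.2
          let S := (PySem.List.pyRange 0 L 1).map
            (fun u => PySem.List.pyGetD R (max (u - l) 0) 0 + PySem.List.pyGetD acc.1 u 0)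
          (S, acc.2 ++ [(PySem.List.pyRange l L 1).map (fun u => vE + PySem.List.pyGetD S u 0)]))
        (List.replicate L.toNat 0, [])
      (total, p.2.reverse))
    init
  res.1 + (res.2.map List.sum).sum

-- ===== PRECONDITION & SPEC =====
def Spec_count_CC_rect (a : Int) (L : Int) (out : Int) : Prop := out = count_CC_rect_alt a L
instance (a : Int) (L : Int) (out : Int) : Decidable (Spec_count_CC_rect a L out) := by unfold Spec_count_CC_rect; infer_instance

-- ===== CLAIM (what is proved, stated in full; the proofs are below) =====
def Claim_equal_count_CC_rect : Prop := ∀ (a : Int) (L : Int), Dom_count_CC_rect a L → Spec_count_CC_rect a L (count_CC_rect a L)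

-- ===== LEMMAS AND PROOFS =====

-- pairs (l, u), 0 ≤ l ≤ u < L, in the order A enumerates them

def pvPairs (L : Int) : List (Int × Int) :=
  (PySem.List.pyRange 0 L 1).flatMap (fun l => (PySem.List.pyRange l L 1).map (fun u => (l, u)))

-- ghost state: the per-interval counts as a function f, vE the count at 'empty'

def pvRowsOf (L : Int) (f : Int → Int → Int) : List (List Int) :=
  (PySem.List.pyRange 0 L 1).map (fun l => (PySem.List.pyRange l L 1).map (f l))

def pvVOf (L : Int) (vE : Int) (f : Int → Int → Int) : List Int :=
  vE :: (pvRowsOf L f).flatten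

-- Σ_{l0 ≥ l} Σ_{u0 ≥ max(l0,u)} f l0 u0 : one step's new value at interval [l,u] minus vE

def pvSsum (L : Int) (f : Int → Int → Int) (l u : Int) : Int :=
  ((PySem.List.pyRange l L 1).map
    (fun l0 => ((PySem.List.pyRange (max l0 u) L 1).map (f l0)).sum)).sum

def pvTot (L : Int) (vE : Int) (f : Int → Int → Int) : Int :=
  vE + ((pvPairs L).map (fun p => f p.1 p.2)).sum

def pvNewF (L : Int) (vE : Int) (f : Int → Int → Int) : Int → Int → Int :=
  fun l u => vE + pvSsum L f l u

-- the filtered pair sum A computes for target state (l1,u1) is the double range sum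

theorem pvColumnStates_eq (L : Int) :
    pvColumnStates L = none :: (pvPairs L).map some := by
  unfold pvColumnStates pvPairs
  rw [PySem.List.foldl_congr_mem _ _
      (fun st l => st ++ ((PySem.List.pyRange l L 1).map (fun u => some (l, u)))) _
      (fun acc x _ => PySem.List.foldl_append_singleton_eq_map _ _ _)]
  rw [PySem.List.foldl_append_eq_flatMap]
  simp [List.map_flatMap, Function.comp_def]

theorem flatten_pvRowsOf (L : Int) (f : Int → Int → Int) :
    (pvRowsOf L f).flatten = (pvPairs L).map (fun p => f p.1 p.2) := by
  unfold pvRowsOf pvPairs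
  rw [List.map_flatMap, ← List.flatMap_def]
  simp [List.map_map, Function.comp_def]

theorem mem_pvPairs (L : Int) (p : Int × Int) :
    p ∈ pvPairs L ↔ 0 ≤ p.1 ∧ p.1 ≤ p.2 ∧ p.2 < L := by
  unfold pvPairs
  cases p with
  | mk l u =>
    simp only [List.mem_flatMap, List.mem_map, PySem.List.mem_pyRange_one, Prod.mk.injEq]
    constructor
    · rintro ⟨l0, ⟨h1, h2⟩, u0, ⟨h3, h4⟩, rfl, rfl⟩; exact ⟨h1, h3, h4⟩
    · rintro ⟨h1, h2, h3⟩; exact ⟨l, ⟨h1, by omega⟩, u, ⟨h2, h3⟩, rfl, rfl⟩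

theorem filter_le_pyRange (a b c : Int) :
    (PySem.List.pyRange a b 1).filter (fun u => decide (c ≤ u)) = PySem.List.pyRange (max a c) b 1 := by
  have h1 : List.Pairwise (· < ·) ((PySem.List.pyRange a b 1).filter (fun u => decide (c ≤ u))) :=
    List.Pairwise.filter _ (PySem.List.pairwise_lt_pyRange_one a b)
  have h2 := PySem.List.pairwise_lt_pyRange_one (max a c) b
  apply List.Perm.eq_of_pairwise (fun a b _ _ hab hba => absurd hab (by omega)) h1 h2
  rw [List.perm_ext_iff_of_nodup (h1.imp ne_of_lt) (h2.imp ne_of_lt)]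
  intro x
  simp only [List.mem_filter, PySem.List.mem_pyRange_one, decide_eq_true_eq]
  omega

theorem drop_pyRange (a b : Int) (k : Nat) :
    (PySem.List.pyRange a b 1).drop k = PySem.List.pyRange (a + k) b 1 := by
  induction k generalizing a with
  | zero => simp
  | succ n ih =>
    by_cases h : a < b
    · rw [PySem.List.pyRange_one_cons h]
      simp only [List.drop_succ_cons]
      rw [ih]
      congr 1; push_cast; ring
    · rw [PySem.List.pyRange_one_eq_nil (by omega), PySem.List.pyRange_one_eq_nil (by omega)]
      simp

theorem pairs_filter_sum (L : Int) (f : Int → Int → Int) (l1 u1 : Int)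
    (h0 : 0 ≤ l1) (_h1 : l1 ≤ u1) :
    (((pvPairs L).filter (fun p => pvAllowed (some p) (some (l1, u1)))).map
      (fun p => f p.1 p.2)).sum = pvSsum L f l1 u1 := by
  unfold pvPairs pvSsum
  rw [List.filter_flatMap, List.map_flatMap]
  have hsum : ∀ (l : List Int) (g : Int → List Int),
      (l.flatMap g).sum = (l.map (fun x => (g x).sum)).sum := by
    intro l g; rw [List.flatMap, List.sum_flatten, List.map_map]; rfl
  rw [hsum]
  have hrow : ∀ l0 : Int, l1 ≤ l0 →
      ((((PySem.List.pyRange l0 L 1).map (fun u => (l0, u))).filter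
        (fun p => pvAllowed (some p) (some (l1, u1)))).map (fun p => f p.1 p.2)).sum
      = ((PySem.List.pyRange (max l0 u1) L 1).map (f l0)).sum := by
    intro l0 hl0
    rw [List.filter_map, List.map_map]
    have hp : ((fun p => pvAllowed (some p) (some (l1, u1))) ∘ (fun u => (l0, u)))
        = fun u => decide (u1 ≤ u) := by
      funext u
      simp only [Function.comp, pvAllowed]
      have : l1 ≤ l0 := hl0
      simp [this]
    rw [hp, filter_le_pyRange]
    rfl
  have hzero : ∀ l0 : Int, l0 < l1 →
      ((((PySem.List.pyRange l0 L 1).map (fun u => (l0, u))).filter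
        (fun p => pvAllowed (some p) (some (l1, u1)))).map (fun p => f p.1 p.2)).sum = 0 := by
    intro l0 hl0
    have : ((PySem.List.pyRange l0 L 1).map (fun u => (l0, u))).filter
        (fun p => pvAllowed (some p) (some (l1, u1))) = [] := by
      rw [List.filter_eq_nil_iff]
      intro p hp
      simp only [List.mem_map] at hp
      obtain ⟨u, _, rfl⟩ := hp
      simp only [pvAllowed]
      have : ¬ (l1 ≤ l0) := by omega
      simp [this]
    rw [this]; rfl
  by_cases hL : l1 ≤ L
  · rw [PySem.List.pyRange_one_append 0 l1 L h0 hL, List.map_append, List.sum_append]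
    rw [List.sum_eq_zero (by
      intro y hy
      simp only [List.mem_map] at hy
      obtain ⟨x, hx, rfl⟩ := hy
      rw [PySem.List.mem_pyRange_one] at hx
      exact hzero x (by omega)), zero_add]
    exact congrArg List.sum (List.map_congr_left (fun x hx =>
      hrow x (PySem.List.mem_pyRange_one.mp hx).1))
  · rw [PySem.List.pyRange_one_eq_nil (le_of_lt (by omega : (L:Int) < l1))]
    simp only [List.map_nil, List.sum_nil]
    apply List.sum_eq_zero
    intro y hy
    simp only [List.mem_map] at hy
    obtain ⟨x, hx, rfl⟩ := hy
    rw [PySem.List.mem_pyRange_one] at hx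
    exact hzero x (by omega)

def pvStepA (L : Int) (v : List Int) : List Int :=
  (pvColumnStates L).map (fun sj =>
    ((pvColumnStates L).zip v).foldl
      (fun total si_vi => if pvAllowed si_vi.1 sj then total + si_vi.2 else total) 0)

theorem pvAllowed_none_left (s : Option (Int × Int)) : pvAllowed none s = true := rfl

theorem pvAllowed_none_right (s : Option (Int × Int)) : pvAllowed s none = true := by
  rcases s with _ | ⟨l, u⟩ <;> rfl

theorem stepA_eq (L : Int) (vE : Int) (f : Int → Int → Int) :
    pvStepA L (pvVOf L vE f) = pvVOf L (pvTot L vE f) (pvNewF L vE f) := by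
  unfold pvStepA pvVOf
  simp only [pvColumnStates_eq, flatten_pvRowsOf]
  have hval : ∀ sj, ((none :: (pvPairs L).map some).zip
      (vE :: (pvPairs L).map (fun p => f p.1 p.2))).foldl
      (fun total si_vi => if pvAllowed si_vi.1 sj then total + si_vi.2 else total) 0
      = (pvPairs L).foldl
        (fun t p => if pvAllowed (some p) sj then t + f p.1 p.2 else t) vE := by
    intro sj
    rw [List.zip_cons_cons, List.zip_map', List.foldl_cons]
    simp only [pvAllowed_none_left, if_true, zero_add, List.foldl_map]
  rw [List.map_cons, List.map_map]
  congr 1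
  · -- head: target state E
    rw [hval none]
    rw [PySem.List.foldl_congr_mem _ _ (fun t p => t + f p.1 p.2) _
      (fun acc x _ => by rw [pvAllowed_none_right, if_pos rfl])]
    rw [PySem.List.foldl_add]
    rfl
  · -- tail: target states (l1, u1)
    apply List.map_congr_left
    intro p hp
    obtain ⟨h0, h1, h2⟩ := (mem_pvPairs L p).mp hp
    rcases p with ⟨l1, u1⟩
    simp only [Function.comp_apply]
    rw [hval (some (l1, u1))]
    rw [PySem.List.foldl_if_eq_foldl_filter (fun p => pvAllowed (some p) (some (l1, u1)))
      (fun t p => t + f p.1 p.2)]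
    rw [PySem.List.foldl_add]
    rw [pairs_filter_sum L f l1 u1 h0 h1]
    rfl

theorem pvSuffix_headD (row : List Int) : (pvSuffix row).headD 0 = row.sum := by
  induction row with
  | nil => rfl
  | cons x xs ih => simp only [pvSuffix, List.headD_cons, List.sum_cons, ih]

theorem pvSuffix_getD (row : List Int) (k : Nat) :
    (pvSuffix row).getD k 0 = (row.drop k).sum := by
  induction row generalizing k with
  | nil => cases k <;> simp [pvSuffix]
  | cons x xs ih =>
    cases k with
    | zero =>
      show x + (pvSuffix xs).headD 0 = (x :: xs).sum
      rw [pvSuffix_headD, List.sum_cons]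
    | succ n => simpa [pvSuffix] using ih n

def pvSOf (L : Int) (f : Int → Int → Int) (l : Int) : List Int :=
  (PySem.List.pyRange 0 L 1).map (fun u => pvSsum L f l u)

def pvNewRow (L : Int) (vE : Int) (f : Int → Int → Int) (l : Int) : List Int :=
  (PySem.List.pyRange l L 1).map (pvNewF L vE f l)

theorem pvSsum_cons (L : Int) (f : Int → Int → Int) (l u : Int) (h : l < L) :
    pvSsum L f l u = ((PySem.List.pyRange (max l u) L 1).map (f l)).sum + pvSsum L f (l + 1) u := by
  unfold pvSsum
  rw [PySem.List.pyRange_one_cons h, List.map_cons, List.sum_cons]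

-- the body of B's inner (downward) loop
def pvInner (L : Int) (vE : Int) (acc : List Int × List (List Int)) (lrow : Int × List Int) :
    List Int × List (List Int) :=
  let l := lrow.1
  let R := pvSuffix lrow.2
  let S := (PySem.List.pyRange 0 L 1).map
    (fun u => PySem.List.pyGetD R (max (u - l) 0) 0 + PySem.List.pyGetD acc.1 u 0)
  (S, acc.2 ++ [(PySem.List.pyRange l L 1).map (fun u => vE + PySem.List.pyGetD S u 0)])

theorem pvInner_step (L : Int) (vE : Int) (f : Int → Int → Int) (l : Int)
    (h0 : 0 ≤ l) (h1 : l < L) (acc2 : List (List Int)) :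
    pvInner L vE (pvSOf L f (l + 1), acc2) (l, (PySem.List.pyRange l L 1).map (f l))
      = (pvSOf L f l, acc2 ++ [pvNewRow L vE f l]) := by
  have hS : (PySem.List.pyRange 0 L 1).map
      (fun u => PySem.List.pyGetD (pvSuffix ((PySem.List.pyRange l L 1).map (f l))) (max (u - l) 0) 0
        + PySem.List.pyGetD (pvSOf L f (l + 1)) u 0) = pvSOf L f l := by
    apply List.map_congr_left
    intro u hu
    rw [PySem.List.mem_pyRange_one] at hu
    have htail : PySem.List.pyGetD (pvSOf L f (l + 1)) u 0 = pvSsum L f (l + 1) u :=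
      PySem.List.pyGetD_map_pyRange_of_nonneg _ _ _ _ hu.1 hu.2
    have hk : max (u - l) 0 = ((max (u - l) 0).toNat : Int) := by omega
    have hidx : l + ((max (u - l) 0).toNat : Int) = max l u := by omega
    have hhead : PySem.List.pyGetD (pvSuffix ((PySem.List.pyRange l L 1).map (f l)))
        (max (u - l) 0) 0 = ((PySem.List.pyRange (max l u) L 1).map (f l)).sum := by
      rw [hk, PySem.List.pyGetD_natCast, pvSuffix_getD, ← List.map_drop, drop_pyRange, hidx]
    rw [htail, hhead, ← pvSsum_cons L f l u h1]
  have hrow : (PySem.List.pyRange l L 1).map (fun u => vE + PySem.List.pyGetD (pvSOf L f l) u 0)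
      = pvNewRow L vE f l := by
    apply List.map_congr_left
    intro u hu
    rw [PySem.List.mem_pyRange_one] at hu
    simp only [pvSOf]
    rw [PySem.List.pyGetD_map_pyRange_of_nonneg _ _ _ _ (by omega) hu.2]
    rfl
  simp only [pvInner]
  rw [hS, hrow]

theorem pvSOf_top (L : Int) (f : Int → Int → Int) :
    pvSOf L f L = List.replicate L.toNat 0 := by
  unfold pvSOf
  rw [List.map_congr_left (g := fun _ => (0 : Int)) (fun u _ => by
    unfold pvSsum
    rw [PySem.List.pyRange_one_eq_nil (le_refl L)]
    rfl)]
  rw [List.map_const', PySem.List.length_pyRange_one]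
  norm_num

theorem foldB_inv (L : Int) (vE : Int) (f : Int → Int → Int) :
    ∀ (n : Nat) (l : Int), 0 ≤ l → l + n = L →
    (((PySem.List.pyRange l L 1).map (fun i => (i, (PySem.List.pyRange i L 1).map (f i)))).reverse).foldl
      (pvInner L vE) (List.replicate L.toNat 0, [])
    = (pvSOf L f l, ((PySem.List.pyRange l L 1).map (fun i => pvNewRow L vE f i)).reverse) := by
  intro n
  induction n with
  | zero =>
    intro l h0 hL
    rw [PySem.List.pyRange_one_eq_nil (by omega)]
    simp only [List.map_nil, List.reverse_nil, List.foldl_nil]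
    rw [show l = L by omega, pvSOf_top]
  | succ n ih =>
    intro l h0 hL
    have hlt : l < L := by omega
    rw [PySem.List.pyRange_one_cons hlt, List.map_cons, List.reverse_cons, List.foldl_append]
    rw [ih (l + 1) (by omega) (by omega)]
    simp only [List.foldl_cons, List.foldl_nil]
    rw [pvInner_step L vE f l h0 hlt]
    rw [← List.reverse_cons, ← List.map_cons, ← PySem.List.pyRange_one_cons hlt]

-- the body of B's outer loop
def pvStepB (L : Int) (st : Int × List (List Int)) : Int × List (List Int) :=
  let vE := st.1
  let rows := st.2
  let total := vE + (rows.map List.sum).sum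
  let p := ((PySem.List.pyRange (L - 1) (-1) (-1)).zip rows.reverse).foldl
    (pvInner L vE) (List.replicate L.toNat 0, [])
  (total, p.2.reverse)

theorem zip_self_map {α β : Type} (l : List α) (g : α → β) :
    l.zip (l.map g) = l.map (fun x => (x, g x)) := by
  induction l with
  | nil => rfl
  | cons x xs ih => simp only [List.map_cons, List.zip_cons_cons, ih]

theorem sum_rows (L : Int) (f : Int → Int → Int) :
    ((pvRowsOf L f).map List.sum).sum = ((pvPairs L).map (fun p => f p.1 p.2)).sum := by
  rw [← List.sum_flatten, flatten_pvRowsOf]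

theorem stepB_eq (L : Int) (vE : Int) (f : Int → Int → Int) :
    pvStepB L (vE, pvRowsOf L f) = (pvTot L vE f, pvRowsOf L (pvNewF L vE f)) := by
  unfold pvStepB
  simp only
  rw [sum_rows]
  have hzip : (PySem.List.pyRange (L - 1) (-1) (-1)).zip (pvRowsOf L f).reverse
      = ((PySem.List.pyRange 0 L 1).map
          (fun i => (i, (PySem.List.pyRange i L 1).map (f i)))).reverse := by
    rw [PySem.List.pyRange_neg_one_eq_reverse]
    have h0 : (-1 : Int) + 1 = 0 := by norm_num
    have h1 : L - 1 + 1 = L := by ring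
    rw [h0, h1]
    unfold pvRowsOf
    rw [List.zip_eq_zipWith, ← List.reverse_zipWith (by
      rw [List.length_map]), ← List.zip_eq_zipWith]
    congr 1
    exact zip_self_map _ _
  rw [hzip]
  by_cases hL : 0 ≤ L
  · rw [foldB_inv L vE f L.toNat 0 (le_refl 0) (by omega)]
    simp only [List.reverse_reverse]
    rfl
  · rw [PySem.List.pyRange_one_eq_nil (by omega)]
    simp only [List.map_nil, List.reverse_nil, List.foldl_nil]
    unfold pvRowsOf pvTot
    rw [PySem.List.pyRange_one_eq_nil (by omega)]
    rfl

theorem portA_eq (a L : Int) : count_CC_rect a L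
    = ((PySem.List.pyRange 0 (a - 1) 1).foldl (fun v (_ : Int) => pvStepA L v)
        (List.replicate (pvColumnStates L).length 1)).sum := rfl

theorem portB_eq (a L : Int) : count_CC_rect_alt a L
    = ((PySem.List.pyRange 0 (a - 1) 1).foldl (fun st (_ : Int) => pvStepB L st)
        (1, (PySem.List.pyRange 0 L 1).map (fun l => List.replicate (L - l).toNat 1))).1
      + (((PySem.List.pyRange 0 (a - 1) 1).foldl (fun st (_ : Int) => pvStepB L st)
        (1, (PySem.List.pyRange 0 L 1).map (fun l => List.replicate (L - l).toNat 1))).2.map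
          List.sum).sum := rfl

theorem fold_rel {α β : Type} (R : α → β → Prop) (fa : α → Int → α) (fb : β → Int → β)
    (h : ∀ x y s, R x y → R (fa x s) (fb y s)) :
    ∀ (steps : List Int) (x : α) (y : β), R x y → R (steps.foldl fa x) (steps.foldl fb y) := by
  intro steps
  induction steps with
  | nil => intro x y hxy; exact hxy
  | cons s rest ih => intro x y hxy; exact ih _ _ (h x y s hxy)

theorem init_A (L : Int) :
    List.replicate (pvColumnStates L).length 1 = pvVOf L 1 (fun _ _ => (1 : Int)) := by
  rw [pvColumnStates_eq]
  unfold pvVOf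
  rw [flatten_pvRowsOf, List.length_cons, List.replicate_succ]
  congr 1
  show List.replicate ((pvPairs L).map some).length 1 = (pvPairs L).map (fun _ => (1 : Int))
  rw [List.map_const', List.length_map]

theorem init_B (L : Int) :
    ((PySem.List.pyRange 0 L 1).map (fun l => List.replicate (L - l).toNat 1))
      = pvRowsOf L (fun _ _ => (1 : Int)) := by
  unfold pvRowsOf
  apply List.map_congr_left
  intro l _
  show List.replicate (L - l).toNat 1 = (PySem.List.pyRange l L 1).map (fun _ => (1 : Int))
  rw [List.map_const', PySem.List.length_pyRange_one]

theorem sum_pvVOf (L vE : Int) (f : Int → Int → Int) :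
    (pvVOf L vE f).sum = vE + ((pvRowsOf L f).map List.sum).sum := by
  unfold pvVOf
  rw [List.sum_cons, List.sum_flatten]

theorem count_eq (a L : Int) : count_CC_rect a L = count_CC_rect_alt a L := by
  rw [portA_eq, portB_eq]
  obtain ⟨vE, f, h1, h2⟩ :=
    fold_rel (fun v st => ∃ vE f, v = pvVOf L vE f ∧ st = (vE, pvRowsOf L f))
      (fun v _ => pvStepA L v) (fun st _ => pvStepB L st)
      (by
        rintro x y s ⟨vE, f, rfl, rfl⟩
        exact ⟨pvTot L vE f, pvNewF L vE f, stepA_eq L vE f, stepB_eq L vE f⟩)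
      (PySem.List.pyRange 0 (a - 1) 1)
      (List.replicate (pvColumnStates L).length 1)
      (1, (PySem.List.pyRange 0 L 1).map (fun l => List.replicate (L - l).toNat 1))
      ⟨1, fun _ _ => 1, init_A L, by rw [init_B]⟩
  rw [h1, h2, sum_pvVOf]

-- ===== VERDICT (by name: the statement is the Claim_ definition above) =====
theorem count_CC_rect_spec : Claim_equal_count_CC_rect := by
  intro a L _
  exact count_eq a L
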